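-- pv_equiv track=rewrite | github.com/AaronRch27/algortimo_revision | scripts/principal_validar.py | buscar_final_tabla
-- ===== SOURCE A (Python) =====
-- def buscar_final_tabla(x,tuplas):
--     """
--
--
--     Parameters
--     ----------
--     x : list. Lista de filas
--     tuplas : list. Lista de tuplas de la pregunta
--
--     Returns
--     -------
--     None.
--
--     """
--     fin = distancia(x,1)
--     inicio = tuplas[0][0]
--     p = []
--     for i in fin:
--         fila = x[i]
--         if fila>inicio:
--             r = fila-inicio
--             p.append(r)
--     if not p:
--         p = [0]
--     return p[0]
--
-- def distancia(lista,nfilas):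
--     """
--
--
--     Parameters
--     ----------
--     lista : list. Lista con numeros
--     nfilas : int. La distancia o diferencia a medir
--
--     Returns
--     -------
--     li : list. Regresa una lista con los indices de la lista de entrada en donde se cumple la diferencia señalada
--
--     """
--
--     li = []
--     con = 0
--     for i in lista:
--         try:
--             a = lista[con+1]-lista[con]
--         except:
--             a = 0
--         if a > nfilas:
--             li.append(con)
--         con+=1
--     return li
-- ===== SOURCE B (Python) =====
-- def buscar_final_tabla(x, tuplas):
--     inicio = tuplas[0][0]
--     for i in range(len(x)):
--         try:
--             diff = x[i + 1] - x[i]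
--         except IndexError:
--             diff = 0
--         if diff > 1 and x[i] > inicio:
--             return x[i] - inicio
--     return 0
-- ===== Notes on version B (the rewrite author's own statement) =====
-- stated objective: simpler
-- what changed: B replaces A's two-phase build-the-gap-index-list-then-rescan (helper distancia builds an index list, buscar builds p from it and returns p[0]) with one fused pass that returns the first qualifying x[i]-inicio immediately and 0 after the loop; Pre_ only excludes the inputs (tuplas empty or tuplas[0] empty) where both programs raise IndexError on tuplas[0][0].
import Mathlib
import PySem

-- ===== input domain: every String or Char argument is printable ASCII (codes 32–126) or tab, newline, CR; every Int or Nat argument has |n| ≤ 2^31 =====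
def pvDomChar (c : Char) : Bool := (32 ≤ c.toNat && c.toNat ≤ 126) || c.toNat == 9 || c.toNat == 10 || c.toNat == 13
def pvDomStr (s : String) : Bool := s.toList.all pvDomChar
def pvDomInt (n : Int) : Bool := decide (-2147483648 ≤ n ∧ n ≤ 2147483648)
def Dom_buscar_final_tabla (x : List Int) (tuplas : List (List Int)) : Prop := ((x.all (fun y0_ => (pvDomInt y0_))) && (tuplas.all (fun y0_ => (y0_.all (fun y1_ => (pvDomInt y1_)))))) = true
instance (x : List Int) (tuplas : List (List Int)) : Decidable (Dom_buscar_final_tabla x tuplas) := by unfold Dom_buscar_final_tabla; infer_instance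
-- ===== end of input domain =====

-- ===== PORT A =====
-- B is one fused pass with early return instead of A's build-index-list-then-rescan (objective: simpler).
-- the `try: lista[con+1]-lista[con] except: 0` block, used by both ports (A's distancia and B's loop body)
def pvTrySub (lista : List Int) (con : Nat) : Int :=
  match PySem.List.pyGet? lista ((con : Int) + 1), PySem.List.pyGet? lista (con : Int) with
  | some u, some v => u - v
  | _, _ => 0

-- helper `distancia` of A, transliterated
def pvDistancia (lista : List Int) (nfilas : Int) : List Nat :=
  (List.range lista.length).foldl (fun (li : List Nat) (con : Nat) =>
    let a : Int := pvTrySub lista con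
    if a > nfilas then li ++ [con] else li) []

def buscar_final_tabla (x : List Int) (tuplas : List (List Int)) : Int :=
  let fin := pvDistancia x 1
  -- tuplas[0][0]; exact under Pre_ (otherwise Python raises IndexError)
  let inicio := (PySem.List.pyGet? ((PySem.List.pyGet? tuplas 0).getD []) 0).getD 0
  let p := fin.foldl (fun (p : List Int) (i : Nat) =>
    let fila := (PySem.List.pyGet? x (i : Int)).getD 0   -- i is a valid index produced by distancia
    if fila > inicio then p ++ [fila - inicio] else p) []
  let p := if p = [] then [0] else p
  p.headD 0   -- p[0]; p is nonempty here, so exact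

-- ===== PORT B =====
-- the fused loop of Source B: for i in range(len(x)) with early return, 0 after the loop
def pvGoAlt (x : List Int) (inicio : Int) (i : Nat) : Int :=
  if _h : i < x.length then
    let diff : Int := pvTrySub x i
    let fila : Int := (PySem.List.pyGet? x (i : Int)).getD 0
    if diff > 1 ∧ fila > inicio then fila - inicio else pvGoAlt x inicio (i + 1)
  else 0
termination_by x.length - i

def buscar_final_tabla_alt (x : List Int) (tuplas : List (List Int)) : Int :=
  let inicio := (PySem.List.pyGet? ((PySem.List.pyGet? tuplas 0).getD []) 0).getD 0
  pvGoAlt x inicio 0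

-- ===== PRECONDITION & SPEC =====
-- Pre_ excludes exactly the inputs where A (and B) raise IndexError at tuplas[0][0]:
-- tuplas empty or its first element empty.
def Pre_buscar_final_tabla (x : List Int) (tuplas : List (List Int)) : Prop :=
  tuplas ≠ [] ∧ tuplas.headD [] ≠ []
instance (x : List Int) (tuplas : List (List Int)) : Decidable (Pre_buscar_final_tabla x tuplas) := by
  unfold Pre_buscar_final_tabla; infer_instance

def pvWitness_buscar_final_tabla : List Int × List (List Int) := ([1, 2, 5, 6], [[2, 3]])

def Spec_buscar_final_tabla (x : List Int) (tuplas : List (List Int)) (out : Int) : Prop := out = buscar_final_tabla_alt x tuplas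
instance (x : List Int) (tuplas : List (List Int)) (out : Int) : Decidable (Spec_buscar_final_tabla x tuplas out) := by unfold Spec_buscar_final_tabla; infer_instance

-- ===== CLAIM (what is proved, stated in full; the proofs are below) =====
def Claim_equal_buscar_final_tabla : Prop := ∀ (x : List Int) (tuplas : List (List Int)), Dom_buscar_final_tabla x tuplas → Pre_buscar_final_tabla x tuplas → Spec_buscar_final_tabla x tuplas (buscar_final_tabla x tuplas)

-- ===== LEMMAS AND PROOFS =====

-- the combined per-index selector both results reduce to
def pvG (x : List Int) (inicio : Int) (i : Nat) : Option Int :=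
  if pvTrySub x i > 1 ∧ (PySem.List.pyGet? x (i : Int)).getD 0 > inicio
  then some ((PySem.List.pyGet? x (i : Int)).getD 0 - inicio) else none

theorem pvG_eq (x : List Int) (inicio : Int) (i : Nat) :
    pvG x inicio i
      = if pvTrySub x i > 1 ∧ (PySem.List.pyGet? x (i : Int)).getD 0 > inicio
        then some ((PySem.List.pyGet? x (i : Int)).getD 0 - inicio) else none := rfl

theorem foldl_append_if_filterMap {α β : Type} (c : α → Prop) [DecidablePred c] (v : α → β) :
    ∀ (xs : List α) (acc : List β),
      xs.foldl (fun l i => if c i then l ++ [v i] else l) acc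
        = acc ++ xs.filterMap (fun i => if c i then some (v i) else none) := by
  intro xs
  induction xs with
  | nil => simp
  | cons a t ih =>
    intro acc
    by_cases h : c a <;> simp [h, ih]

theorem filterMap_if_filterMap {α β : Type} (c : α → Prop) [DecidablePred c] (g : α → Option β)
    (xs : List α) :
    (xs.filterMap (fun i => if c i then some i else none)).filterMap g
      = xs.filterMap (fun i => if c i then g i else none) := by
  induction xs with
  | nil => simp
  | cons a t ih =>
    by_cases h : c a
    · cases hg : g a <;> simp [h, hg, ih]
    · simp [h, ih]

theorem pvA_eq_filterMap (x : List Int) (inicio : Int) :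
    ((pvDistancia x 1).foldl (fun (p : List Int) (i : Nat) =>
        if (PySem.List.pyGet? x (i : Int)).getD 0 > inicio
        then p ++ [(PySem.List.pyGet? x (i : Int)).getD 0 - inicio] else p) [])
      = (List.range x.length).filterMap (pvG x inicio) := by
  simp only [pvDistancia]
  rw [foldl_append_if_filterMap (fun con => pvTrySub x con > (1 : Int)) (fun con : Nat => con)]
  rw [foldl_append_if_filterMap
        (fun i : Nat => (PySem.List.pyGet? x (i : Int)).getD 0 > inicio)
        (fun i : Nat => (PySem.List.pyGet? x (i : Int)).getD 0 - inicio)]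
  rw [List.nil_append, List.nil_append]
  rw [filterMap_if_filterMap (fun con => pvTrySub x con > (1 : Int))]
  apply List.filterMap_congr
  intro i _
  rw [pvG_eq]
  by_cases h1 : pvTrySub x i > (1 : Int) <;>
    by_cases h2 : (PySem.List.pyGet? x (i : Int)).getD 0 > inicio <;>
      simp [h1, h2]

theorem pvGoAlt_step (x : List Int) (inicio : Int) (i : Nat) (hi : i < x.length) :
    pvGoAlt x inicio i
      = if pvTrySub x i > 1 ∧ (PySem.List.pyGet? x (i : Int)).getD 0 > inicio
        then (PySem.List.pyGet? x (i : Int)).getD 0 - inicio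
        else pvGoAlt x inicio (i + 1) := by
  rw [pvGoAlt]
  simp only [hi, dif_pos]

theorem pvGoAlt_stop (x : List Int) (inicio : Int) (i : Nat) (hi : ¬ i < x.length) :
    pvGoAlt x inicio i = 0 := by
  rw [pvGoAlt]
  simp only [hi, dif_neg, not_false_iff]

theorem pvGoAlt_eq (x : List Int) (inicio : Int) :
    ∀ (n i : Nat), i + n = x.length →
      pvGoAlt x inicio i = ((List.range' i n).filterMap (pvG x inicio)).headD 0 := by
  intro n
  induction n with
  | zero =>
    intro i h
    rw [pvGoAlt_stop x inicio i (by omega)]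
    rfl
  | succ m ih =>
    intro i h
    have hi : i < x.length := by omega
    rw [pvGoAlt_step x inicio i hi, List.range'_succ, List.filterMap_cons, pvG_eq]
    by_cases hc : pvTrySub x i > 1 ∧ (PySem.List.pyGet? x (i : Int)).getD 0 > inicio
    · rw [if_pos hc, if_pos hc, List.headD_cons]
    · rw [if_neg hc, if_neg hc, ih (i + 1) (by omega)]

-- ===== VERDICT (by name: the statement is the Claim_ definition above) =====
theorem buscar_final_tabla_spec : Claim_equal_buscar_final_tabla := by
  intro x tuplas _hdom _hpre
  unfold Spec_buscar_final_tabla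
  simp only [buscar_final_tabla, buscar_final_tabla_alt]
  rw [pvGoAlt_eq x _ x.length 0 (by omega)]
  rw [← List.range_eq_range']
  rw [pvA_eq_filterMap]
  cases (List.range x.length).filterMap
      (pvG x ((PySem.List.pyGet? ((PySem.List.pyGet? tuplas 0).getD []) 0).getD 0)) with
  | nil => simp
  | cons a t => simp
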